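-- pv_equiv track=rewrite | github.com/Vectorredz/oj-dcs | CS-12/Lab1/Lab1e.py | max_enjoyment
-- ===== SOURCE A (Python) =====
-- def max_enjoyment(nums:list[int]):
--     if len(nums) > 3:
--         sure_nums = sorted(nums)[:3]
--         for k in sure_nums:
--             nums.pop(nums.index(k))
--     maxSum = nums[0]
--     currSum = 0
--     for i in range(len(nums)):
--         for j in range(i, len(nums)):
--             currSum += sum(nums[i:j+1])
--             if currSum < 0:
--                 currSum = 0
--             maxSum = max(maxSum, currSum)
--     return maxSum
-- ===== SOURCE B (Python) =====
-- def max_enjoyment(nums: list[int]):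
--     # Different algorithm shape: build a prefix-sum table once, materialise the
--     # lexicographic stream of subarray sums from it, then do ONE linear
--     # reset/max scan over that stream (A re-sums each slice inside a double
--     # loop).  Trims the same 3 smallest in place (mutates nums, like A).
--     if len(nums) > 3:
--         for k in sorted(nums)[:3]:
--             nums.remove(k)
--     P = [0]
--     t = 0
--     for x in nums:
--         t += x
--         P.append(t)
--     n = len(nums)
--     sums = [P[j + 1] - P[i] for i in range(n) for j in range(i, n)]
--     best = nums[0]
--     cur = 0
--     for s in sums:
--         cur += s
--         if cur < 0:
--             cur = 0
--         if cur > best: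
--             best = cur
--     return best
-- ===== Notes on version B (the rewrite author's own statement) =====
-- stated objective: faster
-- what changed: B builds a prefix-sum table in one pass and replaces A's nested re-summing loops by a materialised stream of subarray sums (each an O(1) prefix-sum difference) scanned once with the reset/max accumulator, dropping a factor of n.
import Mathlib
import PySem

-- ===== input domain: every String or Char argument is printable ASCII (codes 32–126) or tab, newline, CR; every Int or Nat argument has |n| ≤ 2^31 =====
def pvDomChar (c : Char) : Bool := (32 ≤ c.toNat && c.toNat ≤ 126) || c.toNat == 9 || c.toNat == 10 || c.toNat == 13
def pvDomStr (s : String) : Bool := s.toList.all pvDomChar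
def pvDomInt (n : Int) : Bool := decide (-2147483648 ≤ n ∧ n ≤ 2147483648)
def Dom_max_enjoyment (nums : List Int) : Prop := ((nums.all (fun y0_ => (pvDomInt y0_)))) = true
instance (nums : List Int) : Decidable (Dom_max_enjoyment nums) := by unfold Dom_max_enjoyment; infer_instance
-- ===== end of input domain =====

-- B builds a prefix-sum table once and does ONE linear reset/max scan over the
-- materialised stream of subarray sums (A re-sums each slice inside a double loop);
-- both Pythons mutate nums in place while trimming; the equivalence proved here is
-- about the return value.

-- ===== PORT A =====
-- nums.pop(nums.index(k)), one trimming step of A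
def pvTrimStepA (acc : List Int) (k : Int) : List Int :=
  match PySem.List.index? acc k with
  | some i =>
    match PySem.List.pop? acc (i : Int) with
    | some r => r.2
    | none => acc
  | none => acc

def max_enjoyment (nums : List Int) : Int :=
  let nums :=
    if PySem.List.len nums > 3 then
      ((PySem.List.sorted nums (fun x => x) false).take 3).foldl pvTrimStepA nums
    else nums
  let maxSum := PySem.List.pyGetD nums 0 0   -- first element; Pre_ excludes the empty list
  let st :=
    (PySem.List.pyRange 0 (PySem.List.len nums) 1).foldl (fun (st : Int × Int) i =>
      (PySem.List.pyRange i (PySem.List.len nums) 1).foldl (fun (st : Int × Int) j =>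
        let currSum := st.2 + (PySem.List.slice nums (some i) (some (j + 1))).sum
        let currSum := if currSum < 0 then 0 else currSum
        (max st.1 currSum, currSum)) st) (maxSum, 0)
  st.1

-- ===== PORT B =====
-- nums.remove(k), one trimming step of B
def pvTrimStepB (acc : List Int) (k : Int) : List Int :=
  match PySem.List.remove? acc k with
  | some r => r
  | none => acc

def max_enjoyment_alt (nums : List Int) : Int :=
  let nums :=
    if PySem.List.len nums > 3 then
      ((PySem.List.sorted nums (fun x => x) false).take 3).foldl pvTrimStepB nums
    else nums
  -- prefix-sum table P, built by one pass with a running total t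
  let P := (nums.foldl (fun (st : List Int × Int) x =>
      let t := st.2 + x
      (st.1 ++ [t], t)) ([0], 0)).1
  let n := PySem.List.len nums
  -- the stream of all subarray sums, in lexicographic (i, j) order
  let sums := (PySem.List.pyRange 0 n 1).flatMap (fun i =>
      (PySem.List.pyRange i n 1).map (fun j =>
        PySem.List.pyGetD P (j + 1) 0 - PySem.List.pyGetD P i 0))
  let best := PySem.List.pyGetD nums 0 0   -- first element; Pre_ excludes the empty list
  let st := sums.foldl (fun (st : Int × Int) s =>
      let cur := st.2 + s
      let cur := if cur < 0 then 0 else cur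
      let best := if cur > st.1 then cur else st.1
      (best, cur)) (best, 0)
  st.1

-- ===== PRECONDITION & SPEC =====
-- Pre_ excludes only the empty list, where Python's read of the first element raises IndexError.
def Pre_max_enjoyment (nums : List Int) : Prop := nums ≠ []
instance (nums : List Int) : Decidable (Pre_max_enjoyment nums) := by unfold Pre_max_enjoyment; infer_instance
def pvWitness_max_enjoyment : List Int := [3, -1, 4, 1, -5, 9]

def Spec_max_enjoyment (nums : List Int) (out : Int) : Prop := out = max_enjoyment_alt nums
instance (nums : List Int) (out : Int) : Decidable (Spec_max_enjoyment nums out) := by unfold Spec_max_enjoyment; infer_instance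

-- ===== CLAIM (what is proved, stated in full; the proofs are below) =====
def Claim_equal_max_enjoyment : Prop := ∀ (nums : List Int), Dom_max_enjoyment nums → Pre_max_enjoyment nums → Spec_max_enjoyment nums (max_enjoyment nums)

-- ===== LEMMAS AND PROOFS =====

-- erasing the element at its first index is erasing the element
lemma pv_eraseIdx_append (pre suf : List Int) (v : Int) :
    (pre ++ v :: suf).eraseIdx pre.length = pre ++ suf := by
  induction pre with
  | nil => simp
  | cons a t ih => simp [ih]

-- A's pop(index(k)) step equals B's remove(k) step
lemma pv_trim_step_eq : pvTrimStepA = pvTrimStepB := by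
  funext acc k
  unfold pvTrimStepA pvTrimStepB
  by_cases hk : k ∈ acc
  · obtain ⟨n, hn⟩ := Option.isSome_iff_exists.mp ((PySem.List.index?_isSome_iff acc k).mpr hk)
    obtain ⟨pre, suf, hsplit, hlen, hnotpre⟩ := (PySem.List.index?_eq_some_iff acc k n).mp hn
    obtain ⟨hlt, -, -⟩ := PySem.List.getElem_of_index?_eq_some hn
    rw [hn]
    simp only []
    rw [PySem.List.pop?_natCast acc n hlt, PySem.List.remove?_eq_some_erase acc k hk]
    subst hsplit hlen
    rw [pv_eraseIdx_append, List.erase_append_right _ hnotpre]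
    simp
  · rw [(PySem.List.index?_eq_none_iff acc k).mpr hk,
        (PySem.List.remove?_eq_none_iff acc k).mpr hk]

-- B's prefix-table fold, characterised: entry k is the sum of the first k elements
lemma pv_prefix_build (xs : List Int) : ∀ (acc : List Int) (t : Int),
    xs.foldl (fun (st : List Int × Int) x =>
        let t := st.2 + x
        (st.1 ++ [t], t)) (acc, t)
      = (acc ++ (List.range xs.length).map (fun k => t + (xs.take (k + 1)).sum), t + xs.sum) := by
  induction xs with
  | nil => intro acc t; simp
  | cons x xs ih =>
    intro acc t
    simp only [List.foldl_cons, ih (acc ++ [t + x]) (t + x)]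
    rw [Prod.mk.injEq]
    constructor
    · rw [List.append_assoc]
      congr 1
      rw [List.length_cons, List.range_succ_eq_map, List.map_cons, List.map_map]
      simp [Function.comp, add_assoc]
    · simp [add_assoc]

lemma pv_prefix_eq (xs : List Int) :
    (xs.foldl (fun (st : List Int × Int) x =>
        let t := st.2 + x
        (st.1 ++ [t], t)) ([0], 0)).1
      = (List.range (xs.length + 1)).map (fun k => ((xs.take k).sum : Int)) := by
  rw [pv_prefix_build]
  rw [List.range_succ_eq_map, List.map_cons, List.map_map]
  simp [Function.comp]

-- reading the prefix table: P[k] = sum of the first k elements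
lemma pv_prefix_get (xs : List Int) (k : Int) (h0 : 0 ≤ k) (hk : k ≤ xs.length) :
    PySem.List.pyGetD ((List.range (xs.length + 1)).map (fun k => ((xs.take k).sum : Int))) k 0
      = (xs.take k.toNat).sum := by
  rw [PySem.List.pyGetD_eq_getElem _ _ h0 (by simp; omega)]
  simp

-- a slice's sum is a difference of two prefix sums
lemma pv_slice_sum (xs : List Int) (i j : Int) (h0 : 0 ≤ i) (hij : i ≤ j) :
    (PySem.List.slice xs (some i) (some j)).sum
      = (xs.take j.toNat).sum - (xs.take i.toNat).sum := by
  rw [PySem.List.slice_toNat xs h0 (by omega)]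
  have h : j.toNat = i.toNat + (j.toNat - i.toNat) := by omega
  conv_rhs => rw [h, List.take_add]
  rw [List.sum_append]
  ring

-- ===== VERDICT (by name: the statement is the Claim_ definition above) =====
theorem max_enjoyment_spec : Claim_equal_max_enjoyment := by
  intro nums _ _
  unfold Spec_max_enjoyment max_enjoyment max_enjoyment_alt
  rw [pv_trim_step_eq]
  generalize (if PySem.List.len nums > 3 then
      ((PySem.List.sorted nums (fun x => x) false).take 3).foldl pvTrimStepB nums
    else nums) = l
  simp only [pv_prefix_eq, List.foldl_flatMap]
  congr 1
  apply PySem.List.foldl_congr_mem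
  intro st i hi
  obtain ⟨hi0, hin⟩ := PySem.List.mem_pyRange_one.mp hi
  rw [List.foldl_map]
  apply PySem.List.foldl_congr_mem
  intro st' j hj
  obtain ⟨hij, hjn⟩ := PySem.List.mem_pyRange_one.mp hj
  rw [PySem.List.len_eq] at hin hjn
  rw [pv_prefix_get l i hi0 (by omega), pv_prefix_get l (j + 1) (by omega) (by omega),
      pv_slice_sum l i (j + 1) hi0 (by omega), max_def_lt]
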